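-- pv_equiv track=rewrite | github.com/aszokalski/Logia | Etap 2/Logia17/Zad3.py | kolit
-- ===== SOURCE A (Python) =====
-- def kolit(s):
--     ile = 0
--     kolumny = ["" for k in range(len(s))]
--     i = 0
--     while len(s) > i:
--         for j in range(len(s[:i + 1])):
--             kolumny[j] +=  s[:i + 1][j]
--         s = s[i + 1:]
--         i += 1
--     for l in range(len(s)):
--             kolumny[l] +=  s[l]
--
--     for elem in kolumny:
--         if elem is not "":
--             add = True
--             for lit in elem:
--                 if lit is not elem[0]:
--                     add = False
--             if add:
--                 ile += 1
--     return ile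
-- ===== SOURCE B (Python) =====
-- def kolit(s):
--     # Column-major strided scan: column j lives at indices T(j)+j, then +(j+1), +(j+2), ...
--     # in the original string (T = triangular numbers); no rows or column containers built.
--     n = len(s)
--     total = 0
--     j = 0
--     base = 0                      # base == j*(j+1)//2
--     while base + j < n:
--         first = s[base + j]
--         i = base + j + (j + 1)
--         step = j + 2
--         uniform = True
--         while i < n:
--             if s[i] != first:
--                 uniform = False
--                 break
--             i += step
--             step += 1
--         if uniform:
--             total += 1
--         base += j + 1
--         j += 1
--     return total
-- ===== Notes on version B (the rewrite author's own statement) =====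
-- stated objective: faster
-- what changed: B never builds rows or column strings: it scans each column directly in the original string via triangular-number index arithmetic (a strided column-major scan with early exit), instead of A's repeated slicing into per-column strings followed by a second scan over them.
import Mathlib
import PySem

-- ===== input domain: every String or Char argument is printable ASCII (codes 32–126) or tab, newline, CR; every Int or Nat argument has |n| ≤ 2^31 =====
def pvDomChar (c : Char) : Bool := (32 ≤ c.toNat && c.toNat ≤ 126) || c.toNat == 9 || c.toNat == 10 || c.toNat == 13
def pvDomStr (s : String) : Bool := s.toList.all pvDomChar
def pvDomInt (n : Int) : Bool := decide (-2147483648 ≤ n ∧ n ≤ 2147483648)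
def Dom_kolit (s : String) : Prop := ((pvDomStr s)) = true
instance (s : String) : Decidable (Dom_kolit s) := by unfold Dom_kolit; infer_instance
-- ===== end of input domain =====

-- B replaces A's row-by-row slicing into per-column strings (plus a second scan
-- over them) by a direct column-major strided scan of the original string using
-- triangular-number index arithmetic: faster in a timing run.
-- On the ASCII domain CPython interns 1-char strings and "", so A's `is not`
-- tests behave as inequality; both ports use plain (in)equality accordingly.

-- ===== PORT A =====
-- kolumny[j] += chunk[j] for j in range(len(chunk)) (chunk never longer than kolumny here)
def kolitDist : List Char → List (List Char) → List (List Char)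
  | [], kol => kol
  | _ :: _, [] => []                    -- unreachable on A's inputs (IndexError in Python)
  | c :: cs, col :: ks => (col ++ [c]) :: kolitDist cs ks

-- while len(s) > i: distribute s[:i+1]; s = s[i+1:]; i += 1 — returns final (s, kolumny)
def kolitLoop (s : List Char) (kol : List (List Char)) (i : Nat) :
    List Char × List (List Char) :=
  if h : s.length > i then
    kolitLoop (s.drop (i + 1)) (kolitDist (s.take (i + 1)) kol) (i + 1)
  else (s, kol)
termination_by s.length
decreasing_by simp; omega

-- add = True; for lit in elem: if lit is not elem[0]: add = False
def kolitAdd (e0 : Char) (elem : List Char) : Bool :=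
  elem.foldl (fun add lit => if lit ≠ e0 then false else add) true

def kolit (s : String) : Int :=
  let cs := s.toList
  let p := kolitLoop cs (List.replicate cs.length []) 0
  let kolumny := kolitDist p.1 p.2      -- trailing: for l in range(len(s)): kolumny[l] += s[l]
  kolumny.foldl (fun ile elem =>
    match elem with
    | [] => ile                          -- elem is "" (skipped)
    | e0 :: _ => if kolitAdd e0 elem then ile + 1 else ile) 0

-- ===== PORT B =====
-- inner while: i < n: if s[i] != first: break(False); i += step; step += 1
-- (Python's step is encoded as k+1 so the recursion visibly increases i)
def kolitInner (cs : List Char) (first : Char) (i k : Nat) : Bool :=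
  if h : i < cs.length then
    if cs[i] != first then false
    else kolitInner cs first (i + (k + 1)) (k + 1)
  else true
termination_by cs.length - i
decreasing_by omega

-- outer while: base + j < n: check column j (first char at base+j), total += uniform
def kolitOuter (cs : List Char) (j base : Nat) (total : Int) : Int :=
  if h : base + j < cs.length then
    kolitOuter cs (j + 1) (base + (j + 1))
      (if kolitInner cs cs[base + j] (base + j + (j + 1)) (j + 1) then total + 1 else total)
  else total
termination_by cs.length - j
decreasing_by omega

def kolit_alt (s : String) : Int := kolitOuter s.toList 0 0 0

-- ===== PRECONDITION & SPEC =====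
def Spec_kolit (s : String) (out : Int) : Prop := out = kolit_alt s
instance (s : String) (out : Int) : Decidable (Spec_kolit s out) := by unfold Spec_kolit; infer_instance

-- ===== CLAIM (what is proved, stated in full; the proofs are below) =====
def Claim_equal_kolit : Prop := ∀ (s : String), Dom_kolit s → Spec_kolit s (kolit s)

-- ===== LEMMAS AND PROOFS =====

-- Abstraction used only by the proofs: the triangular columns, built row-major
-- (specLoop, mirroring A) and column-major (colsOf), and the strided column colIdx.
def addRow : List Char → List (List Char) → List (List Char)
  | [], cs => cs
  | c :: row, [] => [c] :: addRow row []
  | c :: row, col :: cs => (col ++ [c]) :: addRow row cs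

def specLoop (rest : List Char) (w : Nat) (cols : List (List Char)) : List (List Char) :=
  match rest with
  | [] => cols
  | x :: xs => specLoop ((x :: xs).drop (w + 1)) (w + 1) (addRow ((x :: xs).take (w + 1)) cols)
termination_by rest.length
decreasing_by simp

def mergeCol : List Char → List (List Char) → List (List Char)
  | [], d => d
  | c :: row, [] => [c] :: mergeCol row []
  | c :: row, col :: ds => (c :: col) :: mergeCol row ds

def colsOf (rest : List Char) (w : Nat) : List (List Char) :=
  match rest with
  | [] => []
  | x :: xs => mergeCol ((x :: xs).take (w + 1)) (colsOf ((x :: xs).drop (w + 1)) (w + 1))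
termination_by rest.length
decreasing_by simp

def zipApp : List (List Char) → List (List Char) → List (List Char)
  | [], d => d
  | c :: cs, [] => c :: cs
  | c :: cs, d :: ds => (c ++ d) :: zipApp cs ds

def colIdx (cs : List Char) (i k : Nat) : List Char :=
  if h : i < cs.length then cs[i] :: colIdx cs (i + (k + 1)) (k + 1) else []
termination_by cs.length - i
decreasing_by omega

def triOff : Nat → Nat → Nat
  | _, 0 => 0
  | w, k + 1 => (w + 1) + triOff (w + 1) k

-- the counting fold from kolit, named for the proofs
def countF (ile : Int) (elem : List Char) : Int :=
  match elem with
  | [] => ile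
  | e0 :: _ => if kolitAdd e0 elem then ile + 1 else ile

def countL : List (List Char) → Int
  | [] => 0
  | e :: es =>
    (match e with
     | [] => (0 : Int)
     | e0 :: _ => if kolitAdd e0 e then 1 else 0) + countL es

lemma countF_eq :
    (fun (ile : Int) (elem : List Char) =>
      match elem with
      | [] => ile
      | e0 :: _ => if kolitAdd e0 elem then ile + 1 else ile) = countF := rfl

lemma foldl_countF_empties (pad : List (List Char)) (acc : Int)
    (hp : ∀ x ∈ pad, x = ([] : List Char)) :
    pad.foldl countF acc = acc := by
  induction pad generalizing acc with
  | nil => rfl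
  | cons p ps ih =>
    have hp0 := hp p (by simp)
    subst hp0
    simp only [List.foldl_cons, countF]
    exact ih acc (fun x hx => hp x (by simp [hx]))

lemma kolitAdd_eq_all (e0 : Char) (l : List Char) (b : Bool) :
    l.foldl (fun add lit => if lit ≠ e0 then false else add) b = (b && l.all (· == e0)) := by
  induction l generalizing b with
  | nil => simp
  | cons c cs ih =>
    simp only [List.foldl_cons, List.all_cons]
    rw [ih]
    by_cases hc : c = e0 <;> simp [hc]

lemma foldl_countF_countL (L : List (List Char)) (a : Int) :
    L.foldl countF a = a + countL L := by
  induction L generalizing a with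
  | nil => simp [countL]
  | cons e es ih =>
    simp only [List.foldl_cons, countL]
    rw [ih]
    cases e with
    | nil => simp [countF]
    | cons e0 tl =>
      simp only [countF]
      split <;> ring

lemma distPad (chunk : List Char) :
    ∀ (cols pad : List (List Char)), (∀ x ∈ pad, x = ([] : List Char)) →
    chunk.length ≤ cols.length + pad.length →
    ∃ pad', (∀ x ∈ pad', x = ([] : List Char)) ∧
      kolitDist chunk (cols ++ pad) = addRow chunk cols ++ pad' ∧
      (addRow chunk cols).length + pad'.length = cols.length + pad.length := by
  induction chunk with
  | nil => intro cols pad hp _; exact ⟨pad, hp, by simp [kolitDist, addRow], by simp [addRow]⟩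
  | cons c cs ih =>
    intro cols pad hp hlen
    match cols with
    | col :: cols' =>
      obtain ⟨pad', h1, h2, h3⟩ := ih cols' pad hp (by simp at hlen ⊢; omega)
      exact ⟨pad', h1, by simp [kolitDist, addRow, h2], by simp [addRow] at h3 ⊢; omega⟩
    | [] =>
      cases pad with
      | nil => simp at hlen
      | cons p pad2 =>
        have hp0 : p = [] := hp p (by simp)
        subst hp0
        obtain ⟨pad', h1, h2, h3⟩ := ih [] pad2
          (fun x hx => hp x (by simp [hx])) (by simp at hlen ⊢; omega)
        refine ⟨pad', h1, ?_, ?_⟩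
        · simpa [kolitDist, addRow] using h2
        · simp [addRow] at h3 ⊢; omega

lemma loopTrail : ∀ (n : Nat) (s : List Char), s.length ≤ n →
    ∀ (cols pad : List (List Char)) (i : Nat), (∀ x ∈ pad, x = ([] : List Char)) →
    s.length ≤ cols.length + pad.length →
    ∃ pad', (∀ x ∈ pad', x = ([] : List Char)) ∧
      kolitDist (kolitLoop s (cols ++ pad) i).1 (kolitLoop s (cols ++ pad) i).2 =
        specLoop s i cols ++ pad' := by
  intro n
  induction n with
  | zero =>
    intro s hs cols pad i hp _
    have : s = [] := by cases s <;> simp_all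
    subst this
    rw [kolitLoop]
    exact ⟨pad, hp, by simp [kolitDist, specLoop]⟩
  | succ n IH =>
    intro s hs cols pad i hp hlen
    cases s with
    | nil =>
      rw [kolitLoop]
      exact ⟨pad, hp, by simp [kolitDist, specLoop]⟩
    | cons x xs =>
      by_cases h : (x :: xs).length > i
      · rw [kolitLoop, dif_pos h]
        obtain ⟨pad1, hp1, hd1, hl1⟩ := distPad ((x :: xs).take (i + 1)) cols pad hp
          (by simp only [List.length_take, List.length_cons] at hlen ⊢; omega)
        rw [hd1]
        obtain ⟨pad', hp', heq⟩ := IH ((x :: xs).drop (i + 1))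
          (by simp only [List.length_drop, List.length_cons] at hs ⊢; omega)
          (addRow ((x :: xs).take (i + 1)) cols) pad1 (i + 1) hp1
          (by simp only [List.length_drop, List.length_cons] at hlen ⊢; omega)
        refine ⟨pad', hp', ?_⟩
        rw [heq, specLoop]
      · rw [kolitLoop, dif_neg h]
        simp only [not_lt, List.length_cons] at h
        obtain ⟨pad', hp', hd, _⟩ := distPad (x :: xs) cols pad hp hlen
        refine ⟨pad', hp', ?_⟩
        rw [specLoop]
        have ht : (x :: xs).take (i + 1) = x :: xs :=
          List.take_of_length_le (by simp; omega)
        have hdrop : (x :: xs).drop (i + 1) = [] :=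
          List.drop_eq_nil_of_le (by simp; omega)
        rw [ht, hdrop, specLoop]
        exact hd

lemma zipApp_nil_right (c : List (List Char)) : zipApp c [] = c := by
  cases c <;> rfl

lemma zipApp_addRow (row : List Char) :
    ∀ (cols d : List (List Char)),
      zipApp (addRow row cols) d = zipApp cols (mergeCol row d) := by
  induction row with
  | nil => intro cols d; rfl
  | cons c r ih =>
    intro cols d
    match cols, d with
    | [], [] =>
      simp only [addRow, mergeCol, zipApp]
      have := ih [] []
      rw [zipApp_nil_right] at this
      simp only [zipApp] at this
      rw [this]
    | [], e :: ds =>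
      simp only [addRow, mergeCol, zipApp, List.singleton_append]
      have := ih [] ds
      simp only [zipApp] at this
      rw [this]
    | k :: ks, [] =>
      simp only [addRow, mergeCol, zipApp]
      have := ih ks []
      rw [zipApp_nil_right] at this
      rw [this]
    | k :: ks, e :: ds =>
      simp only [addRow, mergeCol, zipApp, List.append_assoc, List.singleton_append]
      rw [ih ks ds]

lemma specLoop_zipApp : ∀ (n : Nat) (rest : List Char), rest.length ≤ n →
    ∀ (w : Nat) (cols : List (List Char)),
    specLoop rest w cols = zipApp cols (colsOf rest w) := by
  intro n
  induction n with
  | zero =>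
    intro rest hr w cols
    have : rest = [] := by cases rest <;> simp_all
    subst this
    rw [specLoop, colsOf, zipApp_nil_right]
  | succ n IH =>
    intro rest hr w cols
    cases rest with
    | nil => rw [specLoop, colsOf, zipApp_nil_right]
    | cons x xs =>
      rw [specLoop, colsOf,
        IH _ (by simp only [List.length_drop, List.length_cons] at hr ⊢; omega),
        zipApp_addRow]

lemma mergeCol_get_lt (row : List Char) :
    ∀ (d : List (List Char)) (j : Nat) (h : j < row.length),
      (mergeCol row d)[j]? = some (row[j] :: (d[j]?.getD [])) := by
  induction row with
  | nil => intro d j h; simp at h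
  | cons c r ih =>
    intro d j h
    match d, j with
    | [], 0 => simp [mergeCol]
    | [], j + 1 =>
      have := ih [] j (by simpa using h)
      simpa [mergeCol] using this
    | e :: ds, 0 => simp [mergeCol]
    | e :: ds, j + 1 =>
      have := ih ds j (by simpa using h)
      simpa [mergeCol] using this

lemma mergeCol_get_ge (row : List Char) :
    ∀ (d : List (List Char)) (j : Nat), row.length ≤ j →
      (mergeCol row d)[j]? = d[j]? := by
  induction row with
  | nil => intro d j _; rfl
  | cons c r ih =>
    intro d j h
    match d, j with
    | [], j + 1 =>
      have := ih [] j (by simpa using h)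
      simpa [mergeCol] using this
    | e :: ds, j + 1 =>
      have := ih ds j (by simpa using h)
      simpa [mergeCol] using this

lemma colIdx_drop : ∀ (n : Nat) (cs : List Char) (d i k : Nat), cs.length - (d + i) ≤ n →
    colIdx (cs.drop d) i k = colIdx cs (d + i) k := by
  intro n
  induction n with
  | zero =>
    intro cs d i k h
    conv_lhs => rw [colIdx.eq_def]
    conv_rhs => rw [colIdx.eq_def]
    rw [dif_neg (by rw [List.length_drop]; omega), dif_neg (by omega)]
  | succ n IH =>
    intro cs d i k h
    conv_lhs => rw [colIdx.eq_def]
    conv_rhs => rw [colIdx.eq_def]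
    by_cases hc : d + i < cs.length
    · rw [dif_pos (by rw [List.length_drop]; omega), dif_pos hc]
      congr 1
      · exact List.getElem_drop ..
      · rw [IH cs d (i + (k + 1)) (k + 1) (by omega)]
        congr 1
        omega
    · rw [dif_neg (by rw [List.length_drop]; omega), dif_neg hc]

lemma colsOf_get_le : ∀ (n : Nat) (rest : List Char), rest.length ≤ n →
    ∀ (w j : Nat), j ≤ w →
    (colsOf rest w)[j]? =
      if j < rest.length then some (colIdx rest j w) else none := by
  intro n
  induction n with
  | zero =>
    intro rest hr w j hj
    have : rest = [] := by cases rest <;> simp_all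
    subst this
    simp [colsOf]
  | succ n IH =>
    intro rest hr w j hj
    cases rest with
    | nil => simp [colsOf]
    | cons x xs =>
      rw [colsOf]
      have hdroplen : ((x :: xs).drop (w + 1)).length = (x :: xs).length - (w + 1) :=
        List.length_drop
      have hIH := IH ((x :: xs).drop (w + 1))
        (by simp only [List.length_drop, List.length_cons] at *; omega) (w + 1) j (by omega)
      by_cases hcase : j < (x :: xs).length
      · have hrow : j < ((x :: xs).take (w + 1)).length := by
          simp only [List.length_take]; omega
        rw [mergeCol_get_lt _ _ _ hrow, hIH, if_pos hcase]
        conv_rhs => rw [colIdx.eq_def]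
        rw [dif_pos hcase]
        have hgrow : ((x :: xs).take (w + 1))[j] = (x :: xs)[j]'hcase :=
          List.getElem_take ..
        by_cases hin : j < ((x :: xs).drop (w + 1)).length
        · rw [if_pos hin]
          have hcd : colIdx ((x :: xs).drop (w + 1)) j (w + 1)
              = colIdx (x :: xs) (j + (w + 1)) (w + 1) := by
            rw [colIdx_drop ((x :: xs).length) (x :: xs) (w + 1) j (w + 1) (by omega),
              Nat.add_comm (w + 1) j]
          simp only [Option.getD_some]
          rw [hgrow, hcd]
        · rw [if_neg hin]
          simp only [Option.getD_none]
          rw [hgrow]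
          congr 1
          rw [colIdx.eq_def, dif_neg (by omega)]
      · have hrow : ((x :: xs).take (w + 1)).length ≤ j := by
          simp only [List.length_take]; omega
        rw [mergeCol_get_ge _ _ _ hrow, hIH]
        rw [if_neg (by omega), if_neg hcase]

lemma colsOf_get_gt (rest : List Char) (w j : Nat) (h : w < j) :
    (colsOf rest w)[j]? = (colsOf (rest.drop (w + 1)) (w + 1))[j]? := by
  cases rest with
  | nil => simp [colsOf]
  | cons x xs =>
    rw [colsOf]
    exact mergeCol_get_ge _ _ _ (by simp only [List.length_take]; omega)

lemma triOff_succ : ∀ (k w : Nat), triOff w (k + 1) = triOff w k + (w + k + 1) := by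
  intro k
  induction k with
  | zero => intro w; simp [triOff]
  | succ k ih =>
    intro w
    rw [triOff, ih (w + 1)]
    rw [show triOff w (k + 1) = (w + 1) + triOff (w + 1) k from rfl]
    omega

lemma colsOf_get_tri : ∀ (k w : Nat) (rest : List Char),
    (colsOf rest w)[(w + k)]? =
      if triOff w k + (w + k) < rest.length
      then some (colIdx rest (triOff w k + (w + k)) (w + k)) else none := by
  intro k
  induction k with
  | zero =>
    intro w rest
    have := colsOf_get_le rest.length rest le_rfl w w le_rfl
    simpa [triOff] using this
  | succ k IH =>
    intro w rest
    rw [colsOf_get_gt rest w (w + (k + 1)) (by omega)]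
    have h1 : w + (k + 1) = (w + 1) + k := by omega
    rw [h1, IH (w + 1) (rest.drop (w + 1))]
    have hdl : (rest.drop (w + 1)).length = rest.length - (w + 1) := List.length_drop
    have ht : triOff w (k + 1) = (w + 1) + triOff (w + 1) k := rfl
    by_cases hc : triOff (w + 1) k + ((w + 1) + k) < rest.length - (w + 1)
    · rw [if_pos (by omega), if_pos (by omega)]
      have := colIdx_drop rest.length rest (w + 1)
        (triOff (w + 1) k + ((w + 1) + k)) ((w + 1) + k) (by omega)
      rw [this]
      congr 2
      omega
    · rw [if_neg (by omega), if_neg (by omega)]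

lemma kolitInner_eq_all : ∀ (n : Nat) (cs : List Char) (first : Char) (i k : Nat),
    cs.length - i ≤ n →
    kolitInner cs first i k = (colIdx cs i k).all (· == first) := by
  intro n
  induction n with
  | zero =>
    intro cs first i k h
    rw [kolitInner.eq_def, colIdx.eq_def]
    rw [dif_neg (by omega), dif_neg (by omega)]
    rfl
  | succ n IH =>
    intro cs first i k h
    rw [kolitInner.eq_def, colIdx.eq_def]
    by_cases hc : i < cs.length
    · rw [dif_pos hc, dif_pos hc]
      rw [IH cs first (i + (k + 1)) (k + 1) (by omega), List.all_cons]
      cases hh : (cs[i] == first) <;> simp [bne, hh]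
    · rw [dif_neg hc, dif_neg hc]
      rfl

lemma outer_eq : ∀ (n : Nat) (cs : List Char) (j base : Nat) (t : Int),
    cs.length - j ≤ n → base = triOff 0 j →
    kolitOuter cs j base t = t + countL ((colsOf cs 0).drop j) := by
  intro n
  induction n with
  | zero =>
    intro cs j base t hn hb
    subst hb
    rw [kolitOuter.eq_def, dif_neg (by omega)]
    have hget := colsOf_get_tri j 0 cs
    simp only [Nat.zero_add] at hget
    rw [if_neg (by omega)] at hget
    have hlen : (colsOf cs 0).length ≤ j := by
      rcases Nat.lt_or_ge j (colsOf cs 0).length with hlt | hge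
      · rw [List.getElem?_eq_getElem hlt] at hget; simp at hget
      · exact hge
    rw [List.drop_eq_nil_of_le hlen]
    simp [countL]
  | succ n IH =>
    intro cs j base t hn hb
    subst hb
    rw [kolitOuter.eq_def]
    have hget := colsOf_get_tri j 0 cs
    simp only [Nat.zero_add] at hget
    by_cases hc : triOff 0 j + j < cs.length
    · rw [dif_pos hc]
      rw [if_pos hc] at hget
      have hjlt : j < (colsOf cs 0).length := by
        rcases Nat.lt_or_ge j (colsOf cs 0).length with hlt | hge
        · exact hlt
        · rw [List.getElem?_eq_none hge] at hget; simp at hget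
      have hcol : (colsOf cs 0)[j] = colIdx cs (triOff 0 j + j) j := by
        rw [List.getElem?_eq_getElem hjlt] at hget
        exact Option.some.inj hget
      have hdrop := List.drop_eq_getElem_cons hjlt
      have hT : triOff 0 j + (j + 1) = triOff 0 (j + 1) := by
        rw [triOff_succ]; omega
      have hcons : colIdx cs (triOff 0 j + j) j
          = cs[triOff 0 j + j]'hc :: colIdx cs (triOff 0 j + j + (j + 1)) (j + 1) := by
        rw [colIdx.eq_def, dif_pos hc]
      have hinner : kolitInner cs (cs[triOff 0 j + j]'hc) (triOff 0 j + j + (j + 1)) (j + 1)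
          = (colIdx cs (triOff 0 j + j + (j + 1)) (j + 1)).all
              (· == cs[triOff 0 j + j]'hc) :=
        kolitInner_eq_all cs.length cs _ _ _ (by omega)
      have hadd : kolitAdd (cs[triOff 0 j + j]'hc)
          (cs[triOff 0 j + j]'hc :: colIdx cs (triOff 0 j + j + (j + 1)) (j + 1))
          = (colIdx cs (triOff 0 j + j + (j + 1)) (j + 1)).all
              (· == cs[triOff 0 j + j]'hc) := by
        unfold kolitAdd
        rw [kolitAdd_eq_all]
        simp
      rw [hT, IH cs (j + 1) (triOff 0 (j + 1)) _ (by omega) rfl]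
      rw [hdrop]
      simp only [countL, hcol, hcons, hadd, ← hinner]
      split <;> ring
    · rw [dif_neg hc]
      rw [if_neg hc] at hget
      have hlen : (colsOf cs 0).length ≤ j := by
        rcases Nat.lt_or_ge j (colsOf cs 0).length with hlt | hge
        · rw [List.getElem?_eq_getElem hlt] at hget; simp at hget
        · exact hge
      rw [List.drop_eq_nil_of_le hlen]
      simp [countL]

-- ===== VERDICT (by name: the statement is the Claim_ definition above) =====
theorem kolit_spec : Claim_equal_kolit := by
  intro s _
  unfold Spec_kolit kolit kolit_alt
  simp only [countF_eq]
  obtain ⟨pad', hp', heq⟩ := loopTrail s.toList.length s.toList le_rfl []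
    (List.replicate s.toList.length []) 0
    (fun x hx => List.eq_of_mem_replicate hx) (by simp)
  simp only [List.nil_append] at heq
  rw [heq, List.foldl_append, foldl_countF_empties _ _ hp']
  rw [specLoop_zipApp s.toList.length s.toList le_rfl 0 []]
  rw [show zipApp [] (colsOf s.toList 0) = colsOf s.toList 0 from rfl]
  rw [foldl_countF_countL]
  rw [outer_eq s.toList.length s.toList 0 0 0 (by omega) rfl]
  simp
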